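-- pv_equiv track=rewrite | github.com/AZBCBA/AZL-Language | tools/azl_lsp.py | identifier_at
-- ===== SOURCE A (Python) =====
-- def identifier_at(line: str, col: int) -> str | None:
--     if not line:
--         return None
--     if col < 0:
--         col = 0
--     if col >= len(line):
--         col = len(line) - 1
--     if not (line[col].isalnum() or line[col] == "_"):
--         if col > 0 and (line[col - 1].isalnum() or line[col - 1] == "_"):
--             col -= 1
--         else:
--             return None
--     left = col
--     while left > 0 and (line[left - 1].isalnum() or line[left - 1] == "_"):
--         left -= 1
--     right = col + 1
--     while right < len(line) and (line[right].isalnum() or line[right] == "_"):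
--         right += 1
--     word = line[left:right]
--     return word if word else None
-- ===== SOURCE B (Python) =====
-- def identifier_at(line: str, col: int) -> str | None:
--     if not line:
--         return None
--     n = len(line)
--     def is_word(ch):
--         return ch.isalnum() or ch == "_"
--     c = 0 if col < 0 else (n - 1 if col >= n else col)
--     if not is_word(line[c]):
--         if c > 0 and is_word(line[c - 1]):
--             c -= 1
--         else:
--             return None
--     # one forward pass: collect maximal word-character runs as (start, end) spans
--     spans = []
--     i = 0
--     while i < n:
--         if is_word(line[i]):
--             j = i
--             while j < n and is_word(line[j]):
--                 j += 1
--             spans.append((i, j))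
--             i = j
--         else:
--             i += 1
--     for (s, e) in spans:
--         if s <= c < e:
--             return line[s:e]
--     return None
-- ===== Notes on version B (the rewrite author's own statement) =====
-- stated objective: alternative
-- what changed: B replaces A's bidirectional expansion from the column (two while loops walking left and right) with a single forward tokenisation pass that builds the list of maximal word-character spans and then selects the span containing the effective column.
import Mathlib
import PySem

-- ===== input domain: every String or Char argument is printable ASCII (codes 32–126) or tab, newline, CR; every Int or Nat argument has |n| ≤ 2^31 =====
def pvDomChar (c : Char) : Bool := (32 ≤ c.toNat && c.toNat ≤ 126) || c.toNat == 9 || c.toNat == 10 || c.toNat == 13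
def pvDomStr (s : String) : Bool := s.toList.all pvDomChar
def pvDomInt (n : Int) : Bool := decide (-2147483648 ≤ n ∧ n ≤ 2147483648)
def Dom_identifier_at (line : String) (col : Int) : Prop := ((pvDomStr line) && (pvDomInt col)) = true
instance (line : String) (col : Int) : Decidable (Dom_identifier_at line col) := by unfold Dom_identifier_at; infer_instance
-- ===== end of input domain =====

-- B is an alternative implementation: instead of expanding left/right from the column,
-- it tokenises the line into maximal word-character spans in one forward pass and selects
-- the span containing the effective column.

-- shared word-character predicate: c.isalnum() or c == "_"
def pvIsWord (c : Char) : Bool := PySem.Chars.isalnum c || c == '_'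

-- ===== PORT A =====
-- while left > 0 and isWord(line[left-1]): left -= 1
def pvLeft (cs : List Char) : Nat → Nat
  | 0 => 0
  | l + 1 => if pvIsWord (cs.getD l ' ') then pvLeft cs l else l + 1

-- while right < len(line) and isWord(line[right]): right += 1
-- (fuel = remaining distance to the end of the list; it only makes the loop total)
def pvRightGo (cs : List Char) : Nat → Nat → Nat
  | r, 0 => r
  | r, f + 1 => if r < cs.length ∧ pvIsWord (cs.getD r ' ') then pvRightGo cs (r + 1) f else r

def pvRight (cs : List Char) (r : Nat) : Nat := pvRightGo cs r (cs.length - r)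

def identifier_at (line : String) (col : Int) : Option String :=
  let cs := line.toList
  if cs.isEmpty then none
  else
    let col1 : Int := if col < 0 then 0 else col
    let col2 : Int := if col1 ≥ (cs.length : Int) then (cs.length : Int) - 1 else col1
    let c : Nat := col2.toNat
    let c? : Option Nat :=
      if pvIsWord (cs.getD c ' ') then some c
      else if 0 < c ∧ pvIsWord (cs.getD (c - 1) ' ') then some (c - 1)
      else none
    match c? with
    | none => none
    | some c =>
      let left := pvLeft cs c
      let right := pvRight cs (c + 1)
      let word := PySem.List.slice cs (some (left : Int)) (some (right : Int))
      if word.isEmpty then none else some (String.ofList word)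

-- ===== PORT B =====
-- j = i; while j < n and is_word(line[j]): j += 1   (fuel only makes the loop total)
def pvRunEndGo (cs : List Char) : Nat → Nat → Nat
  | j, 0 => j
  | j, f + 1 => if j < cs.length ∧ pvIsWord (cs.getD j ' ') then pvRunEndGo cs (j + 1) f else j

def pvRunEnd (cs : List Char) (j : Nat) : Nat := pvRunEndGo cs j (cs.length - j)

-- forward tokenisation pass: maximal word runs as (start, end) spans (fuel only makes it total)
def pvSpansAux (cs : List Char) : Nat → Nat → List (Nat × Nat)
  | _, 0 => []
  | i, f + 1 =>
    if i < cs.length then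
      if pvIsWord (cs.getD i ' ') then
        (i, pvRunEnd cs i) :: pvSpansAux cs (pvRunEnd cs i) f
      else pvSpansAux cs (i + 1) f
    else []

def identifier_at_alt (line : String) (col : Int) : Option String :=
  let cs := line.toList
  if cs.isEmpty then none
  else
    let n := cs.length
    let c : Nat := if col < 0 then 0 else if col ≥ (n : Int) then n - 1 else col.toNat
    let c? : Option Nat :=
      if pvIsWord (cs.getD c ' ') then some c
      else if 0 < c ∧ pvIsWord (cs.getD (c - 1) ' ') then some (c - 1)
      else none
    match c? with
    | none => none
    | some c =>
      match (pvSpansAux cs 0 n).find? (fun se => se.1 ≤ c && c < se.2) with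
      | some se => some (String.ofList (PySem.List.slice cs (some (se.1 : Int)) (some (se.2 : Int))))
      | none => none

-- ===== PRECONDITION & SPEC =====
def Spec_identifier_at (line : String) (col : Int) (out : Option String) : Prop := out = identifier_at_alt line col
instance (line : String) (col : Int) (out : Option String) : Decidable (Spec_identifier_at line col out) := by unfold Spec_identifier_at; infer_instance

-- ===== CLAIM (what is proved, stated in full; the proofs are below) =====
def Claim_equal_identifier_at : Prop := ∀ (line : String) (col : Int), Dom_identifier_at line col → Spec_identifier_at line col (identifier_at line col)

-- ===== LEMMAS AND PROOFS =====

theorem pvIsWord_oob (cs : List Char) (k : Nat) (h : ¬ k < cs.length) :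
    pvIsWord (cs.getD k ' ') = false := by
  rw [List.getD_eq_getElem?_getD, List.getElem?_eq_none (by omega)]
  decide

theorem pvIsWord_lt (cs : List Char) (k : Nat) (h : pvIsWord (cs.getD k ' ') = true) :
    k < cs.length := by
  by_contra hk
  rw [pvIsWord_oob cs k hk] at h
  exact Bool.false_ne_true h

theorem pvLeft_le (cs : List Char) (c : Nat) : pvLeft cs c ≤ c := by
  induction c with
  | zero => simp [pvLeft]
  | succ l ih =>
    rw [pvLeft]
    split
    · omega
    · omega

theorem pvLeft_word (cs : List Char) (c : Nat) (hc : pvIsWord (cs.getD c ' ') = true) :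
    ∀ k, pvLeft cs c ≤ k → k ≤ c → pvIsWord (cs.getD k ' ') = true := by
  induction c with
  | zero =>
    intro k _ h2
    have hk : k = 0 := Nat.le_zero.mp h2
    rw [hk]; exact hc
  | succ l ih =>
    intro k h1 h2
    rw [pvLeft] at h1
    split at h1
    · rcases Nat.lt_or_ge k (l + 1) with hk | hk
      · exact ih ‹_› k h1 (by omega)
      · have : k = l + 1 := by omega
        rw [this]; exact hc
    · have : k = l + 1 := by omega
      rw [this]; exact hc

theorem pvLeft_boundary (cs : List Char) (c : Nat) (h : 0 < pvLeft cs c) :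
    pvIsWord (cs.getD (pvLeft cs c - 1) ' ') = false := by
  induction c with
  | zero => simp [pvLeft] at h
  | succ l ih =>
    rw [pvLeft] at h ⊢
    by_cases hl : pvIsWord (cs.getD l ' ') = true
    · rw [if_pos hl] at h ⊢; exact ih h
    · rw [if_neg hl] at h ⊢
      simp only [Nat.add_sub_cancel]
      exact Bool.eq_false_iff.mpr hl

theorem pvRunEndGo_eq_pvRightGo (cs : List Char) (f : Nat) :
    ∀ j, pvRunEndGo cs j f = pvRightGo cs j f := by
  induction f with
  | zero => intro j; rfl
  | succ f ih =>
    intro j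
    rw [pvRunEndGo, pvRightGo]
    split
    · exact ih (j + 1)
    · rfl

theorem pvRunEnd_eq_pvRight (cs : List Char) (j : Nat) : pvRunEnd cs j = pvRight cs j :=
  pvRunEndGo_eq_pvRightGo cs (cs.length - j) j

theorem pvRunEndGo_ge (cs : List Char) (f : Nat) : ∀ j, j ≤ pvRunEndGo cs j f := by
  induction f with
  | zero => intro j; exact le_refl j
  | succ f ih =>
    intro j
    rw [pvRunEndGo]
    split
    · exact le_trans (Nat.le_succ j) (ih (j + 1))
    · exact le_refl j

theorem pvRunEnd_ge (cs : List Char) (j : Nat) : j ≤ pvRunEnd cs j :=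
  pvRunEndGo_ge cs (cs.length - j) j

theorem pvRunEndGo_le_of_not_word (cs : List Char) (f : Nat) :
    ∀ j m, j ≤ m → pvIsWord (cs.getD m ' ') = false → pvRunEndGo cs j f ≤ m := by
  induction f with
  | zero => intro j m hjm _; exact hjm
  | succ f ih =>
    intro j m hjm hm
    rw [pvRunEndGo]
    split
    · rcases Nat.eq_or_lt_of_le hjm with h | h
      · rw [← h] at hm
        have := (‹j < cs.length ∧ pvIsWord (cs.getD j ' ') = true›).2
        rw [hm] at this
        exact absurd this (by decide)
      · exact ih (j + 1) m (by omega) hm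
    · exact hjm

theorem pvRunEnd_le_of_not_word (cs : List Char) (j m : Nat) (hjm : j ≤ m)
    (hm : pvIsWord (cs.getD m ' ') = false) : pvRunEnd cs j ≤ m :=
  pvRunEndGo_le_of_not_word cs (cs.length - j) j m hjm hm

theorem pvRunEnd_step (cs : List Char) (j : Nat) (hw : pvIsWord (cs.getD j ' ') = true) :
    pvRunEnd cs j = pvRunEnd cs (j + 1) := by
  have hj := pvIsWord_lt cs j hw
  have h1 : cs.length - j = (cs.length - (j + 1)) + 1 := by omega
  rw [pvRunEnd, pvRunEnd, h1, pvRunEndGo, if_pos ⟨hj, hw⟩]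

theorem pvRunEnd_run (cs : List Char) (d a : Nat)
    (h : ∀ k, a ≤ k → k < a + d → pvIsWord (cs.getD k ' ') = true) :
    pvRunEnd cs a = pvRunEnd cs (a + d) := by
  induction d generalizing a with
  | zero => rfl
  | succ d ih =>
    have ha : pvIsWord (cs.getD a ' ') = true := h a (le_refl a) (by omega)
    rw [pvRunEnd_step cs a ha, ih (a + 1) (by intro k h1 h2; exact h k (by omega) (by omega))]
    congr 1
    omega

-- the main lemma: the forward span scan, started (with enough fuel) at any boundary i left of
-- the word's start, finds exactly the span A computes by expanding left and right from c
theorem find_spans (cs : List Char) (c : Nat) (hw : pvIsWord (cs.getD c ' ') = true)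
    (f : Nat) :
    ∀ i, cs.length - i ≤ f → i ≤ pvLeft cs c →
      (pvSpansAux cs i f).find? (fun se => se.1 ≤ c && c < se.2)
        = some (pvLeft cs c, pvRight cs (c + 1)) := by
  have hc := pvIsWord_lt cs c hw
  have hlc := pvLeft_le cs c
  induction f with
  | zero =>
    intro i hf hi
    omega
  | succ f ih =>
    intro i hf hi
    have hin : i < cs.length := by omega
    rw [pvSpansAux, if_pos hin]
    by_cases hwi : pvIsWord (cs.getD i ' ') = true
    · rw [if_pos hwi]
      rcases Nat.eq_or_lt_of_le hi with heq | hlt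
      · -- i = pvLeft cs c: this run is exactly A's word
        have hrun : pvRunEnd cs i = pvRight cs (c + 1) := by
          rw [← pvRunEnd_eq_pvRight, show c + 1 = i + (c + 1 - i) by omega]
          exact pvRunEnd_run cs (c + 1 - i) i (by
            intro k h1 h2
            exact pvLeft_word cs c hw k (by omega) (by omega))
        have hcr : c < pvRunEnd cs i := by
          have h1 := pvRunEnd_ge cs (c + 1)
          have h2 := pvRunEnd_eq_pvRight cs (c + 1)
          omega
        rw [List.find?_cons_of_pos]
        · rw [hrun, heq]
        · simp only [Bool.and_eq_true, decide_eq_true_eq]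
          exact ⟨by omega, hcr⟩
      · -- i starts an earlier run, ending strictly before pvLeft cs c
        have hb : pvIsWord (cs.getD (pvLeft cs c - 1) ' ') = false :=
          pvLeft_boundary cs c (by omega)
        have hle : pvRunEnd cs i ≤ pvLeft cs c - 1 :=
          pvRunEnd_le_of_not_word cs i (pvLeft cs c - 1) (by omega) hb
        have hstep : i + 1 ≤ pvRunEnd cs i := by
          rw [pvRunEnd_step cs i hwi]; exact pvRunEnd_ge cs (i + 1)
        rw [List.find?_cons_of_neg]
        · exact ih (pvRunEnd cs i) (by omega) (by omega)
        · simp only [Bool.and_eq_true, decide_eq_true_eq, not_and]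
          intro _
          omega
    · rw [if_neg hwi]
      have hne : i ≠ pvLeft cs c := by
        intro h
        exact hwi (by rw [h]; exact pvLeft_word cs c hw (pvLeft cs c) (le_refl _) hlc)
      exact ih (i + 1) (by omega) (by omega)

-- the two cores agree at any in-range word position c
theorem core_eq (cs : List Char) (c : Nat) (hw : pvIsWord (cs.getD c ' ') = true) :
    (let left := pvLeft cs c
     let right := pvRight cs (c + 1)
     let word := PySem.List.slice cs (some (left : Int)) (some (right : Int))
     if word.isEmpty then none else some (String.ofList word))
    = (match (pvSpansAux cs 0 cs.length).find? (fun se => se.1 ≤ c && c < se.2) with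
       | some se => some (String.ofList (PySem.List.slice cs (some (se.1 : Int)) (some (se.2 : Int))))
       | none => none) := by
  have hc := pvIsWord_lt cs c hw
  rw [find_spans cs c hw cs.length 0 (by omega) (Nat.zero_le _)]
  simp only
  have hl := pvLeft_le cs c
  have hr : c < pvRight cs (c + 1) := by
    have h1 := pvRunEnd_ge cs (c + 1)
    have h2 := pvRunEnd_eq_pvRight cs (c + 1)
    omega
  have hne : ¬ (PySem.List.slice cs (some ((pvLeft cs c : Nat) : Int))
      (some ((pvRight cs (c + 1) : Nat) : Int))).isEmpty = true := by
    rw [PySem.List.slice_natCast, List.isEmpty_iff_length_eq_zero]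
    simp only [List.length_take, List.length_drop]
    omega
  rw [if_neg hne]

-- ===== VERDICT (by name: the statement is the Claim_ definition above) =====
theorem identifier_at_spec : Claim_equal_identifier_at := by
  intro line col _
  unfold Spec_identifier_at identifier_at identifier_at_alt
  simp only
  by_cases hemp : line.toList.isEmpty = true
  · rw [if_pos hemp, if_pos hemp]
  · rw [if_neg hemp, if_neg hemp]
    have hn : 0 < line.toList.length := by
      cases h : line.toList with
      | nil => rw [h] at hemp; simp at hemp
      | cons a l => simp [h]
    set cs := line.toList with hcs
    have hceq :
        ((if (if col < 0 then 0 else col) ≥ (cs.length : Int) then (cs.length : Int) - 1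
          else (if col < 0 then 0 else col)).toNat)
        = (if col < 0 then 0 else if col ≥ (cs.length : Int) then cs.length - 1 else col.toNat) := by
      split_ifs with h1 h2 h3 <;> omega
    rw [hceq]
    set c : Nat := if col < 0 then 0 else if col ≥ (cs.length : Int) then cs.length - 1 else col.toNat with hc
    by_cases hw : pvIsWord (cs.getD c ' ') = true
    · simp only [hw, if_pos]
      exact core_eq cs c hw
    · simp only [hw, Bool.false_eq_true, if_false]
      by_cases h2 : 0 < c ∧ pvIsWord (cs.getD (c - 1) ' ') = true
      · rw [if_pos h2]
        exact core_eq cs (c - 1) h2.2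
      · rw [if_neg h2]
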